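-- pv_equiv track=rewrite | github.com/cjhosken/NCCARenderFarmTools | standalone/NCCARenderFarm/src/libs/qb/__init__.py | binarySort
-- ===== SOURCE A (Python) =====
-- def binarySort(origList):
--     """Return a new list reordered with first, last, and then the recursed median values for the remaining items.
--
--     :Since: Qube 5.3.
--
--     :Parameters:
--         origList : list
--             original list to be sorted
--
--     :Returns: new sorted list
--
--     :Example: qb.binarySort([1,2,3,4,5,6,7,8,9,10])
--     """
--     if len(origList) < 2:
--         return origList[:] # return copy of original list values unless list has more than 2 items
--     else:
--         # Helper function that returns a list reordered by the recursed median values of the lists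
--         # Embedded in the binarySort so that this helper function is not overtly exposed
--         def calculateMedianValues(theLists):
--             """
--             Return a list reordered by the recursed median values of the lists
--             """
--             mids = []
--             newLists = []
--             for aList in theLists:
--                 if len(aList) > 0:
--                     midIndex = (len(aList)-1)//2
--                     newLists.append(aList[:midIndex])
--                     mids.append( aList[midIndex] )
--                     newLists.append(aList[midIndex+1:])
--             if len(newLists) > 0: mids.extend( calculateMedianValues(newLists) )
--             return mids
--         # Add the first, last, and then recursed median values
--         sortedList = [origList[0], origList[-1]]
--         sortedList.extend( calculateMedianValues([origList[1:-1]]) )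
--         return sortedList
-- ===== SOURCE B (Python) =====
-- def binarySort(origList):
--     """BFS over index ranges (half-open [lo,hi)) in a flat queue; picks median
--     indices directly from origList, no slicing or copying."""
--     n = len(origList)
--     if n < 2:
--         return origList[:]
--     out = [origList[0], origList[n - 1]]
--     queue = [(1, n - 1)]
--     head = 0
--     while head < len(queue):
--         lo, hi = queue[head]
--         head += 1
--         if lo < hi:
--             mid = lo + (hi - lo - 1) // 2
--             out.append(origList[mid])
--             queue.append((lo, mid))
--             queue.append((mid + 1, hi))
--     return out
-- ===== Notes on version B (the rewrite author's own statement) =====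
-- stated objective: alternative
-- what changed: Replaces A's recursive per-level list slicing (which copies sublists at every level) by an iterative BFS over a flat FIFO queue of (lo,hi) index ranges, reading median elements directly from the original list with no slicing or copying.
import Mathlib
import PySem

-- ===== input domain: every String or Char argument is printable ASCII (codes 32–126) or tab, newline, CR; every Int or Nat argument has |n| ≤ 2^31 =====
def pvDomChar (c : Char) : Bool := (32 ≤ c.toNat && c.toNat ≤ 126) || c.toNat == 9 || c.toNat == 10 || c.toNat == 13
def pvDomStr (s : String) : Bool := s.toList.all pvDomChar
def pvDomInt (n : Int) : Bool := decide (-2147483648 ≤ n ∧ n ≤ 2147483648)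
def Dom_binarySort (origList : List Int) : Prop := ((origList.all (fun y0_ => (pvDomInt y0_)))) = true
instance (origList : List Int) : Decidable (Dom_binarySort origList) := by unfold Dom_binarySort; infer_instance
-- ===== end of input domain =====

-- B replaces A's per-level list slicing/copying recursion by an iterative BFS over a
-- flat FIFO queue of (lo,hi) index ranges (objective: alternative); same return value.

-- ===== PORT A =====
-- the body of calculateMedianValues's for-loop: returns (mids, newLists) of one level
def pvCalcLevel : List (List Int) → List Int × List (List Int)
  | [] => ([], [])
  | aList :: rest =>
    if aList.length > 0 then
      let midIndex : Int := PySem.Int.floordiv ((aList.length : Int) - 1) 2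
      let st := pvCalcLevel rest
      (PySem.List.pyGetD aList midIndex 0 :: st.1,
       PySem.List.slice aList none (some midIndex) ::
         PySem.List.slice aList (some (midIndex + 1)) none :: st.2)
    else pvCalcLevel rest

def pvSumLen (L : List (List Int)) : Nat := (L.map List.length).sum

-- termination fact for pvCalcMedians (cited in its decreasing_by)
lemma pvCalcLevel_len_eq (L : List (List Int)) :
    pvSumLen (pvCalcLevel L).2 + (pvCalcLevel L).1.length = pvSumLen L := by
  induction L with
  | nil => simp [pvCalcLevel, pvSumLen]
  | cons aList rest ih =>
    by_cases h : aList.length > 0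
    · have h1 : 1 ≤ aList.length := h
      have hcast : ((aList.length : Int) - 1) = ((aList.length - 1 : Nat) : Int) := by
        have := Nat.cast_sub (R := Int) h1
        simpa using this.symm
      have hmid : PySem.Int.floordiv ((aList.length : Int) - 1) 2
          = (((aList.length - 1) / 2 : Nat) : Int) := by
        rw [hcast]
        exact_mod_cast PySem.Int.floordiv_natCast (aList.length - 1) 2
      have hm1 : (aList.length - 1) / 2 + 1 ≤ aList.length :=
        Nat.succ_le_of_lt (Nat.lt_of_le_of_lt (Nat.div_le_self _ 2) (Nat.sub_lt h1 Nat.one_pos))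
      simp only [pvCalcLevel, if_pos h, pvSumLen, List.map_cons, List.sum_cons, List.length_cons]
      rw [hmid, PySem.List.slice_to_natCast,
        show (((((aList.length - 1) / 2 : Nat)) : Int) + 1) = (((aList.length - 1) / 2 + 1 : Nat) : Int) from
          (Nat.cast_add_one _).symm,
        PySem.List.slice_from_natCast]
      simp only [List.length_take, List.length_drop]
      rw [Nat.min_eq_left (Nat.le_of_succ_le hm1)]
      simp only [pvSumLen] at ih
      generalize hgen : (aList.length - 1) / 2 = m at hm1 ⊢
      obtain ⟨d, hd⟩ : ∃ d, aList.length = d + (m + 1) :=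
        ⟨_, (Nat.sub_add_cancel hm1).symm⟩
      rw [hd, Nat.add_sub_cancel, ← ih]
      ring
    · simp only [pvCalcLevel, if_neg h, pvSumLen, List.map_cons, List.sum_cons]
      simp only [pvSumLen] at ih
      rw [Nat.eq_zero_of_not_pos h, Nat.zero_add]
      exact ih

lemma pvCalcLevel_nil_of_mids_nil (L : List (List Int)) :
    (pvCalcLevel L).1 = [] → (pvCalcLevel L).2 = [] := by
  induction L with
  | nil => simp [pvCalcLevel]
  | cons aList rest ih =>
    by_cases hne : aList.length > 0
    · simp [pvCalcLevel, if_pos hne]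
    · simpa [pvCalcLevel, if_neg hne] using ih

lemma pvCalcLevel_decreasing (L : List (List Int)) (h : (pvCalcLevel L).2.length > 0) :
    pvSumLen (pvCalcLevel L).2 < pvSumLen L := by
  have he := pvCalcLevel_len_eq L
  have hm : (pvCalcLevel L).1 ≠ [] := by
    intro hnil
    have := pvCalcLevel_nil_of_mids_nil L hnil
    simp [this] at h
  have : (pvCalcLevel L).1.length > 0 := List.length_pos_iff.mpr hm
  omega

def pvCalcMedians (theLists : List (List Int)) : List Int :=
  if h : (pvCalcLevel theLists).2.length > 0 then
    (pvCalcLevel theLists).1 ++ pvCalcMedians (pvCalcLevel theLists).2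
  else
    (pvCalcLevel theLists).1
termination_by pvSumLen theLists
decreasing_by exact pvCalcLevel_decreasing theLists h

def binarySort (origList : List Int) : List Int :=
  if origList.length < 2 then
    PySem.List.slice origList none none
  else
    [PySem.List.pyGetD origList 0 0, PySem.List.pyGetD origList (-1) 0] ++
      pvCalcMedians [PySem.List.slice origList (some 1) (some (-1))]

-- ===== PORT B =====
def pvWeight (q : List (Int × Int)) : Nat :=
  (q.map (fun p => (p.2 - p.1).toNat * 2 + 1)).sum

-- termination facts for pvBfs (cited in its decreasing_by)
lemma pvWeight_dec_split (lo hi : Int) (rest : List (Int × Int)) (h : lo < hi) :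
    pvWeight (rest ++ [(lo, lo + PySem.Int.floordiv (hi - lo - 1) 2),
      (lo + PySem.Int.floordiv (hi - lo - 1) 2 + 1, hi)]) < pvWeight ((lo, hi) :: rest) := by
  have h1 : 0 ≤ hi - lo - 1 := by omega
  have hdiv : PySem.Int.floordiv (hi - lo - 1) 2 = (hi - lo - 1) / 2 :=
    PySem.Int.floordiv_eq_ediv_of_pos (by norm_num)
  have hf0 : 0 ≤ (hi - lo - 1) / 2 := Int.ediv_nonneg h1 (by norm_num)
  have hfle : (hi - lo - 1) / 2 ≤ hi - lo - 1 := Int.ediv_le_self _ h1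
  have hg0 : 0 ≤ hi - (lo + (hi - lo - 1) / 2 + 1) := by
    rw [show hi - (lo + (hi - lo - 1) / 2 + 1) = hi - lo - 1 - (hi - lo - 1) / 2 from by ring]
    exact sub_nonneg.mpr hfle
  simp only [pvWeight, List.map_append, List.map_cons, List.map_nil, List.sum_append,
    List.sum_cons, List.sum_nil, hdiv, add_sub_cancel_left]
  have h2 : ((hi - lo - 1) / 2 + (hi - (lo + (hi - lo - 1) / 2 + 1)) + 1).toNat
      = ((hi - lo - 1) / 2).toNat + (hi - (lo + (hi - lo - 1) / 2 + 1)).toNat + 1 := by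
    rw [Int.toNat_add (add_nonneg hf0 hg0) (by norm_num), Int.toNat_add hf0 hg0]
    norm_num
  rw [show (hi - lo - 1) / 2 + (hi - (lo + (hi - lo - 1) / 2 + 1)) + 1 = hi - lo from by ring] at h2
  rw [h2]
  rw [show ∀ S a b : Nat, S + (a * 2 + 1 + (b * 2 + 1 + 0)) = (a + b + 1) * 2 + S from
      fun S a b => by ring,
    show ∀ S a b : Nat, (a + b + 1) * 2 + 1 + S = ((a + b + 1) * 2 + S) + 1 from
      fun S a b => by ring]
  exact Nat.lt_succ_self _

lemma pvWeight_dec_skip (lo hi : Int) (rest : List (Int × Int)) :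
    pvWeight rest < pvWeight ((lo, hi) :: rest) := by
  simp only [pvWeight, List.map_cons, List.sum_cons]
  exact Nat.lt_add_of_pos_left (Nat.succ_pos _)


-- the while-loop over the queue of index ranges; `out` is produced front-to-back
def pvBfs (xs : List Int) (queue : List (Int × Int)) : List Int :=
  match queue with
  | [] => []
  | (lo, hi) :: rest =>
    if lo < hi then
      let mid := lo + PySem.Int.floordiv (hi - lo - 1) 2
      PySem.List.pyGetD xs mid 0 :: pvBfs xs (rest ++ [(lo, mid), (mid + 1, hi)])
    else
      pvBfs xs rest
termination_by pvWeight queue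
decreasing_by
  · exact pvWeight_dec_split lo hi rest (by omega)
  · exact pvWeight_dec_skip lo hi rest

def binarySort_alt (origList : List Int) : List Int :=
  if origList.length < 2 then
    PySem.List.slice origList none none
  else
    [PySem.List.pyGetD origList 0 0,
     PySem.List.pyGetD origList ((origList.length : Int) - 1) 0] ++
      pvBfs origList [(1, (origList.length : Int) - 1)]

-- ===== PRECONDITION & SPEC =====
def Spec_binarySort (origList : List Int) (out : List Int) : Prop := out = binarySort_alt origList
instance (origList : List Int) (out : List Int) : Decidable (Spec_binarySort origList out) := by unfold Spec_binarySort; infer_instance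

-- ===== CLAIM (what is proved, stated in full; the proofs are below) =====
def Claim_equal_binarySort : Prop := ∀ (origList : List Int), Dom_binarySort origList → Spec_binarySort origList (binarySort origList)

-- ===== LEMMAS AND PROOFS =====

-- the slice of xs described by the index range p = (lo, hi)
def pvSliceOf (xs : List Int) (p : Int × Int) : List Int :=
  (xs.drop p.1.toNat).take (p.2 - p.1).toNat

-- the medians one BFS level contributes, and the child ranges of one level
def pvMid (p : Int × Int) : Int := p.1 + PySem.Int.floordiv (p.2 - p.1 - 1) 2

def pvMidsR (xs : List Int) (q : List (Int × Int)) : List Int :=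
  q.flatMap (fun p => if p.1 < p.2 then [PySem.List.pyGetD xs (pvMid p) 0] else [])

def pvChR (q : List (Int × Int)) : List (Int × Int) :=
  q.flatMap (fun p => if p.1 < p.2 then [(p.1, pvMid p), (pvMid p + 1, p.2)] else [])

def pvValid (n : Nat) (p : Int × Int) : Prop := 0 ≤ p.1 ∧ p.1 ≤ p.2 ∧ p.2 ≤ (n : Int)

def pvM (q : List (Int × Int)) : Nat := (q.map (fun p => (p.2 - p.1).toNat)).sum

-- FIFO decomposition: processing q1 first emits its medians and queues its children
lemma pvBfs_append (xs : List Int) (q1 q2 : List (Int × Int)) :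
    pvBfs xs (q1 ++ q2) = pvMidsR xs q1 ++ pvBfs xs (q2 ++ pvChR q1) := by
  induction q1 generalizing q2 with
  | nil => simp [pvMidsR, pvChR]
  | cons p q1' ih =>
    obtain ⟨lo, hi⟩ := p
    by_cases hlt : lo < hi
    · rw [List.cons_append, pvBfs]
      simp only [if_pos hlt]
      rw [List.append_assoc q1' q2, ih]
      simp only [pvMidsR, pvChR, List.flatMap_cons, if_pos hlt, pvMid]
      simp [List.append_assoc]
    · rw [List.cons_append, pvBfs]
      simp only [if_neg hlt]
      rw [ih]
      simp [pvMidsR, pvChR, List.flatMap_cons, if_neg hlt]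


lemma pvBfs_level (xs : List Int) (q : List (Int × Int)) :
    pvBfs xs q = pvMidsR xs q ++ pvBfs xs (pvChR q) := by
  simpa using pvBfs_append xs q []

lemma pvCalcMedians_level (L : List (List Int)) :
    pvCalcMedians L = (pvCalcLevel L).1 ++ pvCalcMedians (pvCalcLevel L).2 := by
  rw [pvCalcMedians]
  by_cases h : (pvCalcLevel L).2.length > 0
  · rw [dif_pos h]
  · rw [dif_neg h]
    have h2 : (pvCalcLevel L).2 = [] := by
      cases hE : (pvCalcLevel L).2 with
      | nil => rfl
      | cons a t => rw [hE] at h; simp at h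
    rw [h2, pvCalcMedians]
    simp [pvCalcLevel]


lemma pvCalcLevel_map (xs : List Int) (q : List (Int × Int))
    (hv : ∀ p ∈ q, pvValid xs.length p) :
    pvCalcLevel (q.map (pvSliceOf xs)) = (pvMidsR xs q, (pvChR q).map (pvSliceOf xs)) := by
  induction q with
  | nil => simp [pvCalcLevel, pvMidsR, pvChR]
  | cons p q' ih =>
    obtain ⟨lo, hi⟩ := p
    obtain ⟨hv0, hv1, hv2⟩ := hv (lo, hi) (by simp)
    simp only at hv0 hv1 hv2
    have ih' := ih (fun p hp => hv p (List.mem_cons_of_mem _ hp))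
    have hlen : (pvSliceOf xs (lo, hi)).length = (hi - lo).toNat := by
      simp only [pvSliceOf, List.length_take, List.length_drop]
      omega
    by_cases hlt : lo < hi
    · have hpos : (pvSliceOf xs (lo, hi)).length > 0 := by omega
      rw [List.map_cons, pvCalcLevel.eq_def]
      simp only [if_pos hpos]
      rw [ih']
      have hmidI : PySem.Int.floordiv (((pvSliceOf xs (lo, hi)).length : Int) - 1) 2
          = PySem.Int.floordiv (hi - lo - 1) 2 := by
        congr 1
        omega
      have hdiv : PySem.Int.floordiv (hi - lo - 1) 2 = (hi - lo - 1) / 2 :=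
        PySem.Int.floordiv_eq_ediv_of_pos (by omega)
      have hdb : 0 ≤ (hi - lo - 1) / 2 ∧ (hi - lo - 1) / 2 ≤ hi - lo - 1 := by omega
      -- the three components
      have hget : PySem.List.pyGetD (pvSliceOf xs (lo, hi))
          (PySem.Int.floordiv (((pvSliceOf xs (lo, hi)).length : Int) - 1) 2) 0
          = PySem.List.pyGetD xs (pvMid (lo, hi)) 0 := by
        rw [hmidI, hdiv]
        rw [PySem.List.pyGetD_eq_getElem _ _ (by omega) (by omega)]
        rw [PySem.List.pyGetD_eq_getElem _ _ (by simp [pvMid, hdiv]; omega)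
          (by simp [pvMid, hdiv]; omega)]
        simp only [pvSliceOf, List.getElem_take, List.getElem_drop]
        congr 1
        simp [pvMid, hdiv]
        omega
      have hleft : PySem.List.slice (pvSliceOf xs (lo, hi)) none
          (some (PySem.Int.floordiv (((pvSliceOf xs (lo, hi)).length : Int) - 1) 2))
          = pvSliceOf xs (lo, pvMid (lo, hi)) := by
        rw [hmidI, hdiv]
        rw [PySem.List.slice_to (xs := pvSliceOf xs (lo, hi)) (b := (hi - lo - 1) / 2) (by omega)]
        simp only [pvSliceOf, List.take_take]
        congr 1
        simp [pvMid, hdiv]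
        omega
      have hright : PySem.List.slice (pvSliceOf xs (lo, hi))
          (some (PySem.Int.floordiv (((pvSliceOf xs (lo, hi)).length : Int) - 1) 2 + 1)) none
          = pvSliceOf xs (pvMid (lo, hi) + 1, hi) := by
        rw [hmidI, hdiv]
        rw [PySem.List.slice_from (xs := pvSliceOf xs (lo, hi)) (a := (hi - lo - 1) / 2 + 1) (by omega)]
        simp only [pvSliceOf, List.drop_take, List.drop_drop]
        have e1 : lo.toNat + ((hi - lo - 1) / 2 + 1).toNat = ((pvMid (lo, hi) + 1 : Int)).toNat := by
          simp [pvMid, hdiv]; omega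
        have e2 : (hi - lo).toNat - ((hi - lo - 1) / 2 + 1).toNat
            = (hi - (pvMid (lo, hi) + 1)).toNat := by
          simp [pvMid, hdiv]; omega
        rw [e1, e2]
      rw [hget, hleft, hright]
      simp only [pvMidsR, pvChR, List.flatMap_cons, if_pos hlt, List.map_append]
      simp
    · have hz : (pvSliceOf xs (lo, hi)).length = 0 := by omega
      rw [List.map_cons, pvCalcLevel.eq_def]
      simp only [hz]
      rw [if_neg (by omega)]
      rw [ih']
      simp [pvMidsR, pvChR, List.flatMap_cons, if_neg hlt]


lemma pvChR_valid (n : Nat) (q : List (Int × Int)) (hv : ∀ p ∈ q, pvValid n p) :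
    ∀ p ∈ pvChR q, pvValid n p := by
  intro p hp
  simp only [pvChR, List.mem_flatMap] at hp
  obtain ⟨r, hr, hpr⟩ := hp
  obtain ⟨h0, h1, h2⟩ := hv r hr
  by_cases hlt : r.1 < r.2
  · rw [if_pos hlt] at hpr
    have hdiv : PySem.Int.floordiv (r.2 - r.1 - 1) 2 = (r.2 - r.1 - 1) / 2 :=
      PySem.Int.floordiv_eq_ediv_of_pos (by omega)
    simp only [List.mem_cons] at hpr
    rcases hpr with h | h | h
    · subst h
      exact ⟨h0, by simp only [pvMid, hdiv]; omega, by simp only [pvMid, hdiv]; omega⟩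
    · subst h
      exact ⟨by simp only [pvMid, hdiv]; omega, by simp only [pvMid, hdiv]; omega, h2⟩
    · simp at h
  · rw [if_neg hlt] at hpr
    simp at hpr


lemma pvMidsR_nil (xs : List Int) (q : List (Int × Int)) (h : ∀ p ∈ q, ¬ p.1 < p.2) :
    pvMidsR xs q = [] := by
  simp only [pvMidsR, List.flatMap_eq_nil_iff]
  intro p hp
  rw [if_neg (h p hp)]


lemma pvChR_nil (q : List (Int × Int)) (h : ∀ p ∈ q, ¬ p.1 < p.2) :
    pvChR q = [] := by
  simp only [pvChR, List.flatMap_eq_nil_iff]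
  intro p hp
  rw [if_neg (h p hp)]

lemma pvM_chR_lt (q : List (Int × Int)) (hv : ∀ p ∈ q, 0 ≤ p.1)
    (hact : ∃ p ∈ q, p.1 < p.2) : pvM (pvChR q) < pvM q := by
  induction q with
  | nil => simp at hact
  | cons p q' ih =>
    have h0 : 0 ≤ p.1 := hv p (by simp)
    have hv' : ∀ r ∈ q', 0 ≤ r.1 := fun r hr => hv r (List.mem_cons_of_mem _ hr)
    by_cases hlt : p.1 < p.2
    · have hdiv : PySem.Int.floordiv (p.2 - p.1 - 1) 2 = (p.2 - p.1 - 1) / 2 :=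
        PySem.Int.floordiv_eq_ediv_of_pos (by omega)
      have hle : pvM (pvChR q') ≤ pvM q' := by
        by_cases hact' : ∃ r ∈ q', r.1 < r.2
        · exact le_of_lt (ih hv' hact')
        · rw [pvChR_nil q' (by push_neg at hact'; exact fun r hr => not_lt.mpr (hact' r hr))]
          simp [pvM]
      simp only [pvChR, pvM, List.flatMap_cons, List.map_append, List.map_cons, List.sum_append,
        List.sum_cons, if_pos hlt, List.map_nil, List.sum_nil]
      simp only [pvChR, pvM, pvMid] at hle
      simp only [pvMid, hdiv]
      omega
    · obtain ⟨r, hr, hrlt⟩ := hact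
      rcases List.mem_cons.mp hr with h | h
      · subst h; exact absurd hrlt hlt
      · have := ih hv' ⟨r, h, hrlt⟩
        simp only [pvChR, pvM, List.flatMap_cons, if_neg hlt, List.nil_append, List.map_cons,
          List.sum_cons]
        simp only [pvChR, pvM] at this
        omega



lemma pvMain (xs : List Int) (m : Nat) (q : List (Int × Int)) (hm : pvM q ≤ m)
    (hv : ∀ p ∈ q, pvValid xs.length p) :
    pvBfs xs q = pvCalcMedians (q.map (pvSliceOf xs)) := by
  induction m generalizing q with
  | zero =>
    have hdeg : ∀ p ∈ q, ¬ p.1 < p.2 := by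
      intro p hp hlt
      have h1 : (p.2 - p.1).toNat ≤ pvM q :=
        List.le_sum_of_mem (List.mem_map.mpr ⟨p, hp, rfl⟩)
      omega
    rw [pvBfs_level, pvMidsR_nil xs q hdeg, pvChR_nil q hdeg]
    rw [pvCalcMedians_level, pvCalcLevel_map xs q hv, pvMidsR_nil xs q hdeg, pvChR_nil q hdeg]
    simp [pvBfs, pvCalcMedians, pvCalcLevel]
  | succ m ih =>
    by_cases hact : ∃ p ∈ q, p.1 < p.2
    · have hlt : pvM (pvChR q) < pvM q :=
        pvM_chR_lt q (fun p hp => (hv p hp).1) hact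
      rw [pvBfs_level, ih (pvChR q) (by omega) (pvChR_valid xs.length q hv)]
      conv_rhs => rw [pvCalcMedians_level, pvCalcLevel_map xs q hv]
    · push_neg at hact
      have hdeg : ∀ p ∈ q, ¬ p.1 < p.2 := fun p hp => not_lt.mpr (hact p hp)
      rw [pvBfs_level, pvMidsR_nil xs q hdeg, pvChR_nil q hdeg]
      rw [pvCalcMedians_level, pvCalcLevel_map xs q hv, pvMidsR_nil xs q hdeg, pvChR_nil q hdeg]
      simp [pvBfs, pvCalcMedians, pvCalcLevel]


-- ===== VERDICT (by name: the statement is the Claim_ definition above) =====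
theorem binarySort_spec : Claim_equal_binarySort := by
  intro xs _
  unfold Spec_binarySort binarySort binarySort_alt
  by_cases hlen : xs.length < 2
  · rw [if_pos hlen, if_pos hlen]
  · rw [if_neg hlen, if_neg hlen]
    have hn : 2 ≤ xs.length := by omega
    have hlast : PySem.List.pyGetD xs (-1) 0 = PySem.List.pyGetD xs ((xs.length : Int) - 1) 0 := by
      rw [PySem.List.pyGetD_neg_one xs 0 (by intro h; subst h; simp at hn)]
      rw [PySem.List.pyGetD_eq_getElem _ _ (by omega) (by omega)]
      rw [List.getLast_eq_getElem]
      congr 1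
      omega
    have hslice : PySem.List.slice xs (some 1) (some (-1)) = pvSliceOf xs (1, (xs.length : Int) - 1) := by
      simp only [PySem.List.slice, PySem.List.clampIdx_neg_one, pvSliceOf]
      have h1 : PySem.List.clampIdx xs.length 1 = 1 := by
        simp [PySem.List.clampIdx]; omega
      rw [h1]
      congr 1
      omega
    have hmain : pvBfs xs [(1, (xs.length : Int) - 1)]
        = pvCalcMedians ([(1, (xs.length : Int) - 1)].map (pvSliceOf xs)) := by
      apply pvMain xs (pvM [(1, (xs.length : Int) - 1)]) _ le_rfl
      intro p hp
      simp only [List.mem_singleton] at hp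
      subst hp
      exact ⟨by norm_num, by constructor <;> [omega; omega]⟩
    rw [hlast, hslice, hmain]
    simp
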